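-- pv_equiv track=rewrite | github.com/Ryn-Bghl/RPS_analysisV2 | logic/table.py | get_next_sequence
-- ===== SOURCE A (Python) =====
-- def get_next_sequence(pre_sequence, data):
--     next_sequence = []
--     for i in range(len(pre_sequence)):
--         for j in range(len(data)):
--             if len(pre_sequence) <= len(data[j]):
--                 if data[j][i] == pre_sequence[i]:
--                     next_sequence.append(data[j])
--         data = next_sequence
--         next_sequence = []
--     return data
-- ===== SOURCE B (Python) =====
-- def get_next_sequence(pre_sequence, data):
--     def _is_prefix(pre, row):
--         if len(pre) > len(row):
--             return False
--         for p, r in zip(pre, row):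
--             if p != r:
--                 return False
--         return True
--     return [d for d in data if _is_prefix(pre_sequence, d)]
-- ===== Notes on version B (the rewrite author's own statement) =====
-- stated objective: faster
-- what changed: Replaced A's column-major multi-pass (one filtering sweep per position of pre_sequence, rebuilding the candidate list each sweep) with a single row-major pass that keeps a row iff pre_sequence is an element-wise prefix of it (short-circuit on first mismatch).
import Mathlib
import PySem

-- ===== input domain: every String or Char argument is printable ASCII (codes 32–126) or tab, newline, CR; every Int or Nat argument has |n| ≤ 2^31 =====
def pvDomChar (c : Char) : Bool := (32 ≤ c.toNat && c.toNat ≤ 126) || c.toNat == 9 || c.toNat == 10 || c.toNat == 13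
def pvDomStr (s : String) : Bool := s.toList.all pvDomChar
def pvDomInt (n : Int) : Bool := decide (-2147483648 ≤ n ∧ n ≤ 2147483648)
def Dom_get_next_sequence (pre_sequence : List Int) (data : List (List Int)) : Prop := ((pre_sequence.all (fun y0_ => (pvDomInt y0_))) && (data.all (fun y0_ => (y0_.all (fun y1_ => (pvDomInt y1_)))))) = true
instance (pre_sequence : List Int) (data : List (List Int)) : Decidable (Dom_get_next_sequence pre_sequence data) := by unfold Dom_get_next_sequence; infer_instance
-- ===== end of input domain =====

-- B replaces A's per-position multi-pass filtering with one row-major prefix-test pass (objective: faster, measured).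

-- ===== PORT A =====
-- inner 'for j in range(len(data))' loop of one i-iteration (index access is always
-- in range when the length guard holds, pyGetD with default 0 is exact there)
def pvPassA (pre : List Int) (i : Int) (data : List (List Int)) : List (List Int) :=
  data.foldl (fun ns row =>
    if pre.length ≤ row.length then
      if PySem.List.pyGetD row i 0 == PySem.List.pyGetD pre i 0 then ns ++ [row] else ns
    else ns) []

def get_next_sequence (pre_sequence : List Int) (data : List (List Int)) : List (List Int) :=
  (PySem.List.pyRange 0 pre_sequence.length 1).foldl
    (fun d i => pvPassA pre_sequence i d) data

-- ===== PORT B =====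
-- _is_prefix: length guard, then element-wise comparison over zip with short-circuit
def pvIsPrefix (pre row : List Int) : Bool :=
  if pre.length > row.length then false
  else (pre.zip row).all (fun pr => pr.1 == pr.2)

def get_next_sequence_alt (pre_sequence : List Int) (data : List (List Int)) : List (List Int) :=
  data.filter (fun d => pvIsPrefix pre_sequence d)

-- ===== PRECONDITION & SPEC =====
def Spec_get_next_sequence (pre_sequence : List Int) (data : List (List Int)) (out : List (List Int)) : Prop := out = get_next_sequence_alt pre_sequence data
instance (pre_sequence : List Int) (data : List (List Int)) (out : List (List Int)) : Decidable (Spec_get_next_sequence pre_sequence data out) := by unfold Spec_get_next_sequence; infer_instance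

-- ===== CLAIM (what is proved, stated in full; the proofs are below) =====
def Claim_equal_get_next_sequence : Prop := ∀ (pre_sequence : List Int) (data : List (List Int)), Dom_get_next_sequence pre_sequence data → Spec_get_next_sequence pre_sequence data (get_next_sequence pre_sequence data)

-- ===== LEMMAS AND PROOFS =====

-- one A-pass is a filter
theorem pvPassA_eq_filter (pre : List Int) (i : Int) (data : List (List Int)) :
    pvPassA pre i data =
      data.filter (fun row =>
        decide (pre.length ≤ row.length) &&
          (PySem.List.pyGetD row i 0 == PySem.List.pyGetD pre i 0)) := by
  have h : ∀ (data : List (List Int)) (acc : List (List Int)),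
      data.foldl (fun ns row =>
        if pre.length ≤ row.length then
          if PySem.List.pyGetD row i 0 == PySem.List.pyGetD pre i 0 then ns ++ [row] else ns
        else ns) acc =
      acc ++ data.filter (fun row =>
        decide (pre.length ≤ row.length) &&
          (PySem.List.pyGetD row i 0 == PySem.List.pyGetD pre i 0)) := by
    intro data
    induction data with
    | nil => intro acc; simp
    | cons r rs ih =>
      intro acc
      rw [List.foldl_cons, List.filter_cons]
      by_cases h1 : pre.length ≤ r.length
      · by_cases h2 : (PySem.List.pyGetD r i 0 == PySem.List.pyGetD pre i 0) = true
        · rw [if_pos h1, if_pos h2, ih]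
          simp [h1, h2]
        · rw [if_pos h1, if_neg h2, ih]
          simp [h1, h2]
      · rw [if_neg h1, ih]
        simp [h1]
  have := h data []
  simpa [pvPassA] using this

-- folding filters is filtering the conjunction
theorem pvFoldFilter {α β : Type} (p : β → α → Bool) (l : List β) (data : List α) :
    l.foldl (fun d i => d.filter (p i)) data =
      data.filter (fun x => l.all (fun i => p i x)) := by
  induction l generalizing data with
  | nil => simp
  | cons i is ih =>
    simp only [List.foldl_cons, ih, List.filter_filter]
    exact List.filter_congr (fun x _ => by simp [Bool.and_comm])

-- the zip-based comparison, as a pointwise statement (under the length guard)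
theorem pvZipAll_iff (pre row : List Int) (h : pre.length ≤ row.length) :
    ((pre.zip row).all (fun pr => pr.1 == pr.2)) = true ↔
      ∀ k : Nat, k < pre.length → pre.getD k 0 = row.getD k 0 := by
  induction pre generalizing row with
  | nil => simp
  | cons p ps ih =>
    cases row with
    | nil => simp at h
    | cons r rs =>
      simp only [List.zip_cons_cons, List.all_cons, Bool.and_eq_true, beq_iff_eq]
      constructor
      · rintro ⟨hpr, hrest⟩ k hk
        cases k with
        | zero => simpa using hpr
        | succ n =>
          have := (ih rs (by simpa using h)).mp hrest n (by simpa using hk)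
          simpa using this
      · intro hall
        refine ⟨by simpa using hall 0 (by simp), ?_⟩
        refine (ih rs (by simpa using h)).mpr ?_
        intro n hn
        have := hall (n + 1) (by simpa using hn)
        simpa using this

-- the per-row condition A accumulates over all i equals B's prefix test
theorem pvCond_eq (pre row : List Int) :
    ((PySem.List.pyRange 0 pre.length 1).all (fun i =>
        decide (pre.length ≤ row.length) &&
          (PySem.List.pyGetD row i 0 == PySem.List.pyGetD pre i 0))) = pvIsPrefix pre row := by
  cases hp : pre with
  | nil => simp [pvIsPrefix]
  | cons p ps =>
    rw [← hp]
    have hlen : 0 < pre.length := by rw [hp]; simp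
    by_cases h : pre.length ≤ row.length
    · simp only [pvIsPrefix, if_neg (by omega : ¬ pre.length > row.length)]
      rcases Bool.eq_false_or_eq_true ((pre.zip row).all (fun pr => pr.1 == pr.2)) with hb | hb
      · rw [hb]
        rw [List.all_eq_true]
        intro i hi
        rw [PySem.List.mem_pyRange_one] at hi
        obtain ⟨h0, h1⟩ := hi
        lift i to Nat using h0
        have hk : i < pre.length := by exact_mod_cast h1
        have := (pvZipAll_iff pre row h).mp hb i hk
        simp [h, PySem.List.pyGetD_natCast]
        simpa [List.getD] using this.symm
      · rw [hb]
        rw [List.all_eq_false]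
        have : ∃ k : Nat, k < pre.length ∧ pre.getD k 0 ≠ row.getD k 0 := by
          by_contra hc
          push Not at hc
          exact absurd ((pvZipAll_iff pre row h).mpr hc) (by simp [hb])
        obtain ⟨k, hk, hne⟩ := this
        refine ⟨(k : Int), ?_, ?_⟩
        · rw [PySem.List.mem_pyRange_one]; constructor <;> [positivity; exact_mod_cast hk]
        · simp [h, PySem.List.pyGetD_natCast]
          exact fun e => hne (by simpa [List.getD] using e.symm)
    · simp only [pvIsPrefix, if_pos (by omega : pre.length > row.length)]
      rw [List.all_eq_false]
      refine ⟨0, ?_, by simp [h]⟩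
      rw [PySem.List.mem_pyRange_one]
      constructor <;> omega

-- ===== VERDICT (by name: the statement is the Claim_ definition above) =====
theorem get_next_sequence_spec : Claim_equal_get_next_sequence := by
  intro pre data _
  show get_next_sequence pre data = get_next_sequence_alt pre data
  unfold get_next_sequence get_next_sequence_alt
  calc (PySem.List.pyRange 0 pre.length 1).foldl (fun d i => pvPassA pre i d) data
      = (PySem.List.pyRange 0 pre.length 1).foldl (fun d i =>
          d.filter (fun row => decide (pre.length ≤ row.length) &&
            (PySem.List.pyGetD row i 0 == PySem.List.pyGetD pre i 0))) data := by
        simp only [pvPassA_eq_filter]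
    _ = data.filter (fun row => (PySem.List.pyRange 0 pre.length 1).all (fun i =>
          decide (pre.length ≤ row.length) &&
            (PySem.List.pyGetD row i 0 == PySem.List.pyGetD pre i 0))) :=
        pvFoldFilter _ _ data
    _ = data.filter (fun d => pvIsPrefix pre d) :=
        List.filter_congr (fun row _ => pvCond_eq pre row)
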